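-- pv_equiv track=rewrite | github.com/NazarioJL/advent_of_code | advent_of_code/solutions/year2025/day_07.py | part_2
-- ===== SOURCE A (Python) =====
-- from functools import cache
--
-- def part_2(s: str) -> int:
--     rows = s.splitlines()
--     start = 0
--     for col, char in enumerate(rows[0]):
--         if char == "S":
--             start = col
--             break
--     col_count = len(rows[0])
--
--     @cache
--     def split(r, c) -> int:
--         if r == len(rows) or c == col_count or c == -1:
--             return 1
--         else:
--             if rows[r][c] == "^":
--                 return split(r + 1, c - 1) + split(r + 1, c + 1)
--             else:
--                 return split(r + 1, c)
--
--     return split(0, start)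
-- ===== SOURCE B (Python) =====
-- def part_2(s: str) -> int:
--     rows = s.splitlines()
--     start = 0
--     for col, char in enumerate(rows[0]):
--         if char == "S":
--             start = col
--             break
--     col_count = len(rows[0])
--     counts = {start: 1}
--     result = 0
--     for r in range(len(rows)):
--         nxt = {}
--         for c, cnt in counts.items():
--             if c == -1 or c == col_count:
--                 result += cnt
--             elif rows[r][c] == "^":
--                 nxt[c - 1] = nxt.get(c - 1, 0) + cnt
--                 nxt[c + 1] = nxt.get(c + 1, 0) + cnt
--             else:
--                 nxt[c] = nxt.get(c, 0) + cnt
--         counts = nxt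
--     return result + sum(counts.values())
-- ===== Notes on version B (the rewrite author's own statement) =====
-- stated objective: alternative
-- what changed: Replaces the memoized top-down recursion over (row, col) states with an iterative forward row-by-row DP that carries a column->path-count dict and accumulates off-grid/bottom exits into a running total.
-- outside the precondition, e.g. on part_2('ab\nc'): A returns 1, B returns 1
import Mathlib
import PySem

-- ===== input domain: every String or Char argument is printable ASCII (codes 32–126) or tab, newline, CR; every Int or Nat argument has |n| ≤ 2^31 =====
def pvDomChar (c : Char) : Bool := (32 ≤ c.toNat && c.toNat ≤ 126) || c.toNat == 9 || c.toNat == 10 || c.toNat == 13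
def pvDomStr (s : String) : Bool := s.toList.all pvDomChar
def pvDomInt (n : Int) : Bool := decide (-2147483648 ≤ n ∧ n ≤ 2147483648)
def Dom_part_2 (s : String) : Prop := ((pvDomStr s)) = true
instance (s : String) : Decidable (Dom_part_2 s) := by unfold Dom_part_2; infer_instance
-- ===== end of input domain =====

-- B replaces A's memoized top-down recursion with an iterative forward row-by-row DP
-- (a column -> path-count dict plus an exit accumulator); objective: alternative.

-- ===== PORT A =====
-- shared preamble helper: `for col, char in enumerate(rows[0]): if char == "S": start = col; break` (start defaults to 0)
def pvStartColGo : List Char → Int → Int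
  | [], _ => 0
  | ch :: t, col => if ch = 'S' then col else pvStartColGo t (col + 1)

def pvStartCol (row : List Char) : Int := pvStartColGo row 0

-- the @cache'd `split(r, c)`: structural recursion on the remaining rows (r ↔ dropped prefix);
-- `rows[r][c]` is PySem.List.pyGet? with a dummy default — `none` is Python's IndexError, excluded by Pre_.
def pvSplitA (colCount : Int) : List (List Char) → Int → Int
  | [], _ => 1
  | row :: rest, c =>
    if c = colCount ∨ c = -1 then 1
    else if (PySem.List.pyGet? row c).getD ' ' = '^' then
      pvSplitA colCount rest (c - 1) + pvSplitA colCount rest (c + 1)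
    else pvSplitA colCount rest c

def part_2 (s : String) : Int :=
  let rows := (PySem.Str.splitlines s).map String.toList
  let row0 := rows.headD []     -- rows[0]; rows = [] is Python's IndexError, excluded by Pre_
  let start := pvStartCol row0
  let colCount : Int := row0.length
  pvSplitA colCount rows start

-- ===== PORT B =====
-- one cell of the inner loop: route `cnt` paths at column `c` of the current row
def pvStepCell (colCount : Int) (row : List Char) (st : PySem.Dict Int Int × Int)
    (p : Int × Int) : PySem.Dict Int Int × Int :=
  if p.1 = -1 ∨ p.1 = colCount then (st.1, st.2 + p.2)
  else if (PySem.List.pyGet? row p.1).getD ' ' = '^' then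
    let d1 := st.1.insert (p.1 - 1) (st.1.getD (p.1 - 1) 0 + p.2)
    (d1.insert (p.1 + 1) (d1.getD (p.1 + 1) 0 + p.2), st.2)
  else (st.1.insert p.1 (st.1.getD p.1 0 + p.2), st.2)

-- one row of the DP: fold the live columns into a fresh next-row dict
def pvStepRow (colCount : Int) (st : PySem.Dict Int Int × Int) (row : List Char) :
    PySem.Dict Int Int × Int :=
  st.1.items.foldl (pvStepCell colCount row) (PySem.Dict.empty, st.2)

def part_2_alt (s : String) : Int :=
  let rows := (PySem.Str.splitlines s).map String.toList
  let row0 := rows.headD []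
  let start := pvStartCol row0
  let colCount : Int := row0.length
  let fin := rows.foldl (pvStepRow colCount) (PySem.Dict.empty.insert start 1, 0)
  fin.2 + fin.1.values.sum

-- ===== PRECONDITION & SPEC =====
-- Pre_ excludes the empty string (A raises IndexError on rows[0]) and grids with a line shorter than
-- the first line: on those A raises IndexError whenever a path visits a missing cell, and whether it
-- does is not closed-form (on ragged grids whose short rows are never visited A still returns, and B matches it).
def Pre_part_2 (s : String) : Prop :=
  PySem.Str.splitlines s ≠ [] ∧
  ∀ row ∈ PySem.Str.splitlines s,
    ((PySem.Str.splitlines s).headD "").toList.length ≤ row.toList.length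
instance (s : String) : Decidable (Pre_part_2 s) := by unfold Pre_part_2; infer_instance

def pvWitness_part_2 : String := ".S.\n^.^\n..."

def Spec_part_2 (s : String) (out : Int) : Prop := out = part_2_alt s
instance (s : String) (out : Int) : Decidable (Spec_part_2 s out) := by unfold Spec_part_2; infer_instance

-- ===== CLAIM (what is proved, stated in full; the proofs are below) =====
def Claim_equal_part_2 : Prop := ∀ (s : String), Dom_part_2 s → Pre_part_2 s → Spec_part_2 s (part_2 s)

-- ===== LEMMAS AND PROOFS =====

-- weighted sum of a dict's entries: Σ count * f column
def pvWsum (f : Int → Int) (d : PySem.Dict Int Int) : Int :=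
  (d.items.map (fun p => p.2 * f p.1)).sum

theorem pvListRepSum (f : Int → Int) (k old w : Int) (l : List (Int × Int))
    (hn : (l.map Prod.fst).Nodup) (hm : (k, old) ∈ l) :
    ((l.map (fun p => if p.1 == k then (k, w) else p)).map (fun p => p.2 * f p.1)).sum
      = (l.map (fun p => p.2 * f p.1)).sum - old * f k + w * f k := by
  induction l with
  | nil => cases hm
  | cons h t ih =>
    simp only [List.map_cons, List.nodup_cons, List.mem_map] at hn
    rcases List.mem_cons.mp hm with he | ht
    · subst he
      have hrest : ∀ p ∈ t, (fun p : Int × Int => if p.1 == k then (k, w) else p) p = p := by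
        intro p hp
        have : p.1 ≠ k := fun hc => hn.1 ⟨p, hp, hc⟩
        simp [this]
      have htail : t.map (fun p : Int × Int => if p.1 == k then (k, w) else p) = t :=
        (List.map_congr_left hrest).trans (List.map_id' t)
      simp only [List.map_cons, htail]
      simp
      ring
    · have hne : h.1 ≠ k := by
        intro hc; exact hn.1 ⟨(k, old), ht, hc.symm ▸ rfl⟩
      have hhead : (if (h.1 == k) = true then (k, w) else h) = h := by simp [hne]
      simp only [List.map_cons, hhead, List.sum_cons]
      rw [ih hn.2 ht]; ring

theorem pvWsum_insert_add (f : Int → Int) (d : PySem.Dict Int Int) (k v : Int)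
    (hn : d.keys.Nodup) :
    pvWsum f (d.insert k (d.getD k 0 + v)) = pvWsum f d + v * f k := by
  by_cases hc : d.contains k = true
  · have hsome : (d.get? k).isSome := by
      rw [← PySem.Dict.contains_eq_isSome_get? d k]; exact hc
    obtain ⟨old, hold⟩ := Option.isSome_iff_exists.mp hsome
    have hmem : (k, old) ∈ d.items := PySem.Dict.mem_items_of_get?_eq_some d hold
    have hgd : d.getD k 0 = old := PySem.Dict.getD_of_get?_eq_some d 0 hold
    unfold pvWsum
    rw [PySem.Dict.items_insert_of_contains _ _ hc,
        pvListRepSum f k old (d.getD k 0 + v) d.items hn hmem, hgd]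
    ring
  · unfold pvWsum
    rw [PySem.Dict.items_insert_of_not_contains _ _ (by simpa using hc),
        PySem.Dict.getD_of_not_contains _ 0 (by simpa using hc)]
    simp

theorem pvStepCell_invariant (colCount : Int) (row : List Char) (g : Int → Int)
    (L : List (Int × Int)) (d0 : PySem.Dict Int Int) (res0 : Int) (hn : d0.keys.Nodup) :
    (L.foldl (pvStepCell colCount row) (d0, res0)).1.keys.Nodup ∧
    (L.foldl (pvStepCell colCount row) (d0, res0)).2
      + pvWsum g (L.foldl (pvStepCell colCount row) (d0, res0)).1
      = res0 + pvWsum g d0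
        + (L.map (fun p => p.2 *
            (if p.1 = -1 ∨ p.1 = colCount then 1
             else if (PySem.List.pyGet? row p.1).getD ' ' = '^' then g (p.1 - 1) + g (p.1 + 1)
             else g p.1))).sum := by
  induction L generalizing d0 res0 with
  | nil => exact ⟨hn, by simp⟩
  | cons p t ih =>
    simp only [List.foldl_cons, List.map_cons, List.sum_cons]
    by_cases h1 : p.1 = -1 ∨ p.1 = colCount
    · have hs : pvStepCell colCount row (d0, res0) p = (d0, res0 + p.2) := by
        simp [pvStepCell, h1]
      rw [hs]
      obtain ⟨ha, hb⟩ := ih d0 (res0 + p.2) hn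
      refine ⟨ha, ?_⟩
      rw [hb]; simp [h1]; ring
    · by_cases h2 : (PySem.List.pyGet? row p.1).getD ' ' = '^'
      · have hs : pvStepCell colCount row (d0, res0) p =
            ((d0.insert (p.1 - 1) (d0.getD (p.1 - 1) 0 + p.2)).insert (p.1 + 1)
              ((d0.insert (p.1 - 1) (d0.getD (p.1 - 1) 0 + p.2)).getD (p.1 + 1) 0 + p.2), res0) := by
          simp [pvStepCell, h1, h2]
        rw [hs]
        have hn1 : (d0.insert (p.1 - 1) (d0.getD (p.1 - 1) 0 + p.2)).keys.Nodup :=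
          PySem.Dict.nodup_keys_insert _ _ _ hn
        have hn2 := PySem.Dict.nodup_keys_insert
          (d0.insert (p.1 - 1) (d0.getD (p.1 - 1) 0 + p.2)) (p.1 + 1)
          ((d0.insert (p.1 - 1) (d0.getD (p.1 - 1) 0 + p.2)).getD (p.1 + 1) 0 + p.2) hn1
        obtain ⟨ha, hb⟩ := ih _ res0 hn2
        refine ⟨ha, ?_⟩
        rw [hb, pvWsum_insert_add g _ _ _ hn1, pvWsum_insert_add g _ _ _ hn]
        simp [h1, h2]; ring
      · have hs : pvStepCell colCount row (d0, res0) p =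
            (d0.insert p.1 (d0.getD p.1 0 + p.2), res0) := by
          simp [pvStepCell, h1, h2]
        rw [hs]
        have hn1 : (d0.insert p.1 (d0.getD p.1 0 + p.2)).keys.Nodup :=
          PySem.Dict.nodup_keys_insert _ _ _ hn
        obtain ⟨ha, hb⟩ := ih _ res0 hn1
        refine ⟨ha, ?_⟩
        rw [hb, pvWsum_insert_add g _ _ _ hn]
        simp [h1, h2]; ring

theorem pvRows_invariant (colCount : Int) (rows : List (List Char))
    (d : PySem.Dict Int Int) (res : Int) (hn : d.keys.Nodup) :
    (rows.foldl (pvStepRow colCount) (d, res)).2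
      + (rows.foldl (pvStepRow colCount) (d, res)).1.values.sum
      = res + pvWsum (pvSplitA colCount rows) d := by
  induction rows generalizing d res with
  | nil =>
    simp only [List.foldl_nil]
    unfold pvWsum
    have : d.values.sum = (d.items.map (fun p => p.2 * pvSplitA colCount [] p.1)).sum := by
      simp only [PySem.Dict.values, pvSplitA, mul_one]
    rw [this]
  | cons row rest ih =>
    simp only [List.foldl_cons]
    have hstep : pvStepRow colCount (d, res) row
        = d.items.foldl (pvStepCell colCount row) (PySem.Dict.empty, res) := rfl
    obtain ⟨ha, hb⟩ := pvStepCell_invariant colCount row (pvSplitA colCount rest) d.items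
      PySem.Dict.empty res PySem.Dict.nodup_keys_empty
    rw [hstep]
    rw [ih _ _ ha, hb]
    have hmap : ∀ p ∈ d.items,
        p.2 * (if p.1 = -1 ∨ p.1 = colCount then 1
               else if (PySem.List.pyGet? row p.1).getD ' ' = '^' then
                 pvSplitA colCount rest (p.1 - 1) + pvSplitA colCount rest (p.1 + 1)
               else pvSplitA colCount rest p.1)
          = p.2 * pvSplitA colCount (row :: rest) p.1 := by
      intro p _
      simp only [pvSplitA]
      by_cases h1 : p.1 = -1 ∨ p.1 = colCount
      · simp [h1, or_comm.mp h1]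
      · push Not at h1
        simp [h1.1, h1.2]
    unfold pvWsum
    rw [List.map_congr_left hmap]
    simp [PySem.Dict.empty]

theorem pvWsum_single (f : Int → Int) (k : Int) :
    pvWsum f (PySem.Dict.empty.insert k 1) = f k := by
  unfold pvWsum
  rw [PySem.Dict.items_insert_of_not_contains _ _ (by simp [PySem.Dict.empty])]
  simp [PySem.Dict.empty]

-- ===== VERDICT (by name: the statement is the Claim_ definition above) =====
theorem part_2_spec : Claim_equal_part_2 := by
  unfold Claim_equal_part_2 Spec_part_2
  intro s _ _
  unfold part_2 part_2_alt
  rw [pvRows_invariant _ _ _ _ (by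
    exact PySem.Dict.nodup_keys_insert _ _ _ PySem.Dict.nodup_keys_empty)]
  rw [pvWsum_single]
  ring
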